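-- pv_equiv track=rewrite | github.com/squad-9/dm | ap.py | genSubset
-- ===== SOURCE A (Python) =====
-- def genSubset(arr):
--     ans = []
--
--     def helper(ind, curr):
--         if(len(arr)-1 == len(curr)):
--             ans.append(curr)
--             return
--         for i in range(ind, len(arr)):
--             helper(i+1, curr+[arr[i]])
--     helper(0, [])
--     return ans
-- ===== SOURCE B (Python) =====
-- def genSubset(arr):
--     return [arr[:i] + arr[i+1:] for i in range(len(arr) - 1, -1, -1)]
-- ===== Notes on version B (the rewrite author's own statement) =====
-- stated objective: simpler
-- what changed: Replaces the recursive combination backtracker with a one-line comprehension that deletes each index in descending order, since every (n-1)-subset is the array minus one element.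
import Mathlib
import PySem

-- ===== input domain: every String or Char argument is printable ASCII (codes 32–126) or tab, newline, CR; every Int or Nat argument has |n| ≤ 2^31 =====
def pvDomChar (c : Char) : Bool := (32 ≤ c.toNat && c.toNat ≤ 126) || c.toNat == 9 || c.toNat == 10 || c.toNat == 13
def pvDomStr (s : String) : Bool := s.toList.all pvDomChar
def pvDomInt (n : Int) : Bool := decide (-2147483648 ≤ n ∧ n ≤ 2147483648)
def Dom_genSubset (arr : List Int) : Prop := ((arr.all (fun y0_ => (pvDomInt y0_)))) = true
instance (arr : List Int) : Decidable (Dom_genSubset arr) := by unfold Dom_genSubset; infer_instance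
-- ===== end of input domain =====

-- B replaces A's recursive combination backtracker with a direct comprehension deleting each
-- index in descending order (simpler; every (n-1)-subset is the array minus one element).


-- ===== PORT A =====
-- helper(ind, curr) threading the accumulated 'ans'; the for-loop over range(ind, len(arr))
-- is a fold over that index range (attach carries the bound needed for termination).
def genSubsetHelper (arr : List Int) (ind : Nat) (curr : List Int) (ans : List (List Int)) :
    List (List Int) :=
  if (arr.length : Int) - 1 = (curr.length : Int) then
    ans ++ [curr]
  else
    (List.range' ind (arr.length - ind)).attach.foldl
      (fun ans i =>
        genSubsetHelper arr (i.1 + 1) (curr ++ [PySem.List.pyGetD arr (i.1 : Int) 0]) ans)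
      ans
termination_by arr.length - ind
decreasing_by
  have h := List.mem_range'.mp i.2
  simp at h
  omega

def genSubset (arr : List Int) : List (List Int) :=
  genSubsetHelper arr 0 [] []

-- ===== PORT B =====
def genSubset_alt (arr : List Int) : List (List Int) :=
  (PySem.List.pyRange ((arr.length : Int) - 1) (-1) (-1)).map
    (fun i => PySem.List.slice arr none (some i) ++ PySem.List.slice arr (some (i + 1)) none)

-- ===== PRECONDITION & SPEC =====
def Spec_genSubset (arr : List Int) (out : List (List Int)) : Prop := out = genSubset_alt arr
instance (arr : List Int) (out : List (List Int)) : Decidable (Spec_genSubset arr out) := by unfold Spec_genSubset; infer_instance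

-- ===== CLAIM (what is proved, stated in full; the proofs are below) =====
def Claim_equal_genSubset : Prop := ∀ (arr : List Int), Dom_genSubset arr → Spec_genSubset arr (genSubset arr)

-- ===== LEMMAS AND PROOFS =====

-- complement of index j: arr with the j-th element deleted (proof-only helper)
def pvC (arr : List Int) (j : Nat) : List Int := arr.take j ++ arr.drop (j + 1)

-- a fold whose step fixes the accumulator on every list element is the identity
theorem pvFoldlFix {b : Type} (f : List (List Int) -> b -> List (List Int)) :
    forall (l : List b) (init : List (List Int)),
      (forall (init' : List (List Int)) (x : b), x ∈ l -> f init' x = init') ->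
      l.foldl f init = init := by
  intro l
  induction l with
  | nil => intro init _; rfl
  | cons a t ih =>
      intro init h
      simp only [List.foldl_cons]
      rw [h init a (by simp)]
      exact ih init (fun init' x hx => h init' x (by simp [hx]))

-- eliminate the 'attach' the port carries only for termination
theorem pvFoldlAttachGS (arr curr : List Int) (l : List Nat) (init : List (List Int)) :
    l.attach.foldl
      (fun ans i => genSubsetHelper arr (i.1 + 1) (curr ++ [PySem.List.pyGetD arr (i.1 : Int) 0]) ans) init
    = l.foldl
      (fun ans i => genSubsetHelper arr (i + 1) (curr ++ [PySem.List.pyGetD arr (i : Int) 0]) ans) init := by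
  induction l generalizing init with
  | nil => rfl
  | cons a t ih =>
      simp only [List.attach_cons, List.foldl_cons, List.foldl_map]
      exact ih _

-- in-range indexing: arr[i] for a Nat index below the length
theorem pvGet (arr : List Int) (i : Nat) (h : i < arr.length) :
    PySem.List.pyGetD arr (i : Int) 0 = arr[i] := by
  rw [PySem.List.pyGetD_eq_getElem arr 0 (Int.natCast_nonneg i) (by exact_mod_cast h)]
  simp

-- states that have already skipped ≥ 2 indices can never reach length n-1: they emit nothing
theorem pvHelperDead (arr : List Int) :
    forall (fuel ind : Nat) (curr : List Int) (ans : List (List Int)),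
      arr.length - ind ≤ fuel -> ind ≤ arr.length -> curr.length + 1 < ind ->
      genSubsetHelper arr ind curr ans = ans := by
  intro fuel
  induction fuel with
  | zero =>
      intro ind curr ans hf hle hlt
      rw [genSubsetHelper]
      rw [if_neg (by omega)]
      have h0 : arr.length - ind = 0 := by omega
      rw [h0]
      rfl
  | succ fuel ih =>
      intro ind curr ans hf hle hlt
      rw [genSubsetHelper]
      rw [if_neg (by omega)]
      rw [pvFoldlAttachGS]
      apply pvFoldlFix
      intro init' i hi
      obtain ⟨k, hk, hik⟩ := List.mem_range'.mp hi
      exact ih (i + 1) _ init' (by omega) (by omega) (by simp; omega)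

-- a state that has skipped exactly one index emits exactly curr ++ (rest of arr)
theorem pvHelperOne (arr : List Int) :
    forall (fuel ind : Nat) (curr : List Int) (ans : List (List Int)),
      arr.length - ind ≤ fuel -> ind ≤ arr.length -> curr.length + 1 = ind ->
      genSubsetHelper arr ind curr ans = ans ++ [curr ++ arr.drop ind] := by
  intro fuel
  induction fuel with
  | zero =>
      intro ind curr ans hf hle heq
      have hind : ind = arr.length := by omega
      rw [genSubsetHelper]
      rw [if_pos (by omega)]
      rw [hind, List.drop_length, List.append_nil]
  | succ fuel ih =>
      intro ind curr ans hf hle heq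
      by_cases hind : ind = arr.length
      · rw [genSubsetHelper]
        rw [if_pos (by omega)]
        rw [hind, List.drop_length, List.append_nil]
      · have hlt : ind < arr.length := by omega
        rw [genSubsetHelper]
        rw [if_neg (by omega)]
        rw [pvFoldlAttachGS]
        have hrange : List.range' ind (arr.length - ind) =
            ind :: List.range' (ind + 1) (arr.length - ind - 1) := by
          have h2 : arr.length - ind = (arr.length - ind - 1) + 1 := by omega
          generalize hK : arr.length - ind - 1 = K at h2 ⊢
          rw [h2, List.range'_succ]
        rw [hrange, List.foldl_cons]
        rw [ih (ind + 1) (curr ++ [PySem.List.pyGetD arr (ind : Int) 0]) ans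
              (by omega) (by omega) (by simp; omega)]
        rw [pvFoldlFix _ _ _ ?_]
        · rw [pvGet arr ind hlt]
          rw [List.append_assoc, List.singleton_append, List.getElem_cons_drop hlt]
        · intro init' i hi
          obtain ⟨k, hk, hik⟩ := List.mem_range'.mp hi
          exact pvHelperDead arr arr.length (i + 1) _ init' (by omega) (by omega)
            (by simp; omega)

-- the no-skip state (curr = arr.take ind) emits the complements of n-1, n-2, …, ind
theorem pvHelperZero (arr : List Int) :
    forall (fuel ind : Nat) (ans : List (List Int)),
      arr.length - ind ≤ fuel -> ind ≤ arr.length ->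
      genSubsetHelper arr ind (arr.take ind) ans =
        ans ++ ((List.range' ind (arr.length - ind)).map (pvC arr)).reverse := by
  intro fuel
  induction fuel with
  | zero =>
      intro ind ans hf hle
      have hind : ind = arr.length := by omega
      rw [genSubsetHelper]
      rw [if_neg (by simp [List.length_take]; omega)]
      rw [pvFoldlAttachGS]
      have h0 : arr.length - ind = 0 := by omega
      rw [h0]
      simp
  | succ fuel ih =>
      intro ind ans hf hle
      by_cases hind : ind = arr.length
      · rw [genSubsetHelper]
        rw [if_neg (by simp [List.length_take]; omega)]
        rw [pvFoldlAttachGS]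
        have h0 : arr.length - ind = 0 := by omega
        rw [h0]
        simp
      · have hlt : ind < arr.length := by omega
        by_cases hlast : ind + 1 = arr.length
        · -- condition n-1 = |take ind| = ind holds: append the current prefix and return
          rw [genSubsetHelper]
          rw [if_pos (by simp [List.length_take]; omega)]
          have h1 : arr.length - ind = 1 := by omega
          rw [h1]
          simp only [List.range'_one, List.map_cons, List.map_nil, List.reverse_singleton]
          have hC : pvC arr ind = arr.take ind := by
            unfold pvC
            rw [hlast, List.drop_length, List.append_nil]
          rw [hC]
        · have hlt2 : ind + 1 < arr.length := by omega
          rw [genSubsetHelper]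
          rw [if_neg (by simp [List.length_take]; omega)]
          rw [pvFoldlAttachGS]
          have hrange : List.range' ind (arr.length - ind) =
              ind :: (ind + 1) :: List.range' (ind + 2) (arr.length - ind - 2) := by
            have h2 : arr.length - ind = (arr.length - ind - 2) + 1 + 1 := by omega
            generalize hK : arr.length - ind - 2 = K at h2 ⊢
            rw [h2, List.range'_succ, List.range'_succ]
          rw [hrange, List.foldl_cons, List.foldl_cons]
          -- first iteration i = ind: extend curr by arr[ind], still no skip
          have htake : arr.take ind ++ [PySem.List.pyGetD arr (ind : Int) 0] =
              arr.take (ind + 1) := by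
            rw [pvGet arr ind hlt, ← List.take_concat_get hlt, List.concat_eq_append]
          rw [htake]
          rw [ih (ind + 1) ans (by omega) (by omega)]
          -- second iteration i = ind+1: skips index ind, emits the complement of ind
          rw [pvHelperOne arr arr.length (ind + 1 + 1) _ _ (by omega) (by omega)
                (by simp [List.length_take]; omega)]
          -- remaining iterations i ≥ ind+2: dead states
          rw [pvFoldlFix _ _ _ ?_]
          · rw [pvGet arr (ind + 1) hlt2]
            have hdrop : List.take ind arr ++ [arr[ind + 1]] ++ List.drop (ind + 1 + 1) arr
                = pvC arr ind := by
              unfold pvC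
              rw [List.append_assoc, List.singleton_append, List.getElem_cons_drop hlt2]
            rw [hdrop]
            have hr2 : List.range' (ind + 1) (arr.length - (ind + 1)) =
                (ind + 1) :: List.range' (ind + 2) (arr.length - ind - 2) := by
              have h2 : arr.length - (ind + 1) = (arr.length - ind - 2) + 1 := by omega
              generalize hK : arr.length - ind - 2 = K at h2 ⊢
              rw [h2, List.range'_succ]
            rw [hr2]
            simp [List.append_assoc]
          · intro init' i hi
            obtain ⟨k, hk, hik⟩ := List.mem_range'.mp hi
            exact pvHelperDead arr arr.length (i + 1) _ init' (by omega) (by omega)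
              (by simp [List.length_take]; omega)

-- B's port is the same descending list of complements
theorem pvAltEq (arr : List Int) :
    genSubset_alt arr = (List.range arr.length).map
      (fun k => pvC arr (arr.length - 1 - k)) := by
  unfold genSubset_alt
  rw [PySem.List.pyRange_neg_one]
  have hlen : (((arr.length : Int) - 1) - (-1)).toNat = arr.length := by omega
  rw [hlen, List.map_map]
  apply List.map_congr_left
  intro k hk
  have hk' : k < arr.length := List.mem_range.mp hk
  simp only [Function.comp]
  have hi : (0 : Int) ≤ (arr.length : Int) - 1 - k := by omega
  rw [PySem.List.slice_to arr hi, PySem.List.slice_from arr (by omega)]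
  have h1 : ((arr.length : Int) - 1 - k).toNat = arr.length - 1 - k := by omega
  have h2 : ((arr.length : Int) - 1 - k + 1).toNat = arr.length - 1 - k + 1 := by omega
  rw [h1, h2]
  rfl

-- ===== VERDICT (by name: the statement is the Claim_ definition above) =====
theorem genSubset_spec : Claim_equal_genSubset := by
  intro arr _
  unfold Spec_genSubset genSubset
  have h := pvHelperZero arr arr.length 0 [] (by omega) (by omega)
  simp only [List.take_zero, Nat.sub_zero] at h
  rw [h, pvAltEq, List.nil_append]
  rw [← List.map_reverse, List.reverse_range']
  rw [List.map_map]
  apply List.map_congr_left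
  intro k hk
  simp only [Function.comp]
  congr 1
  omega
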